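-- pv_equiv track=rewrite | github.com/silverdavi/homebook | packages/generator/src/math_explanations.py | explain_lcd
-- ===== SOURCE A (Python) =====
-- import math
-- from typing import List, Tuple
--
-- def _multiples(n: int, count: int = 10) -> List[int]:
--     """Return the first `count` multiples of n."""
--     return [n * i for i in range(1, count + 1)]
--
-- def explain_lcd(a: int, b: int) -> str:
--     """Step-by-step LCD explanation for students.
--
--     Example output:
--         Multiples of 4: 4, 8, 12, 16, 20, ...
--         Multiples of 6: 6, 12, 18, 24, 30, ...
--         Least Common Denominator (LCD) = 12
--     """
--     lcd = math.lcm(a, b)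
--
--     # Show enough multiples to include the LCD
--     count_a = max(10, lcd // a + 2)
--     count_b = max(10, lcd // b + 2)
--     mult_a = _multiples(a, count_a)
--     mult_b = _multiples(b, count_b)
--
--     # Truncate display at a reasonable length
--     show_a = [m for m in mult_a if m <= lcd + a][:8]
--     show_b = [m for m in mult_b if m <= lcd + b][:8]
--
--     lines = [
--         f"Multiples of {a}: {', '.join(str(m) for m in show_a)}, ...",
--         f"Multiples of {b}: {', '.join(str(m) for m in show_b)}, ...",
--         f"Least Common Denominator (LCD) = {lcd}",
--     ]
--     return "\n".join(lines)
-- ===== SOURCE B (Python) =====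
-- import math
--
-- def explain_lcd(a: int, b: int) -> str:
--     """Step-by-step LCD explanation for students."""
--     lcd = math.lcm(a, b)
--
--     def row(n: int) -> str:
--         # Walk through the multiples of n one at a time, stopping once we
--         # have shown 8 of them or gone past the LCD.
--         parts = []
--         m = n
--         while len(parts) < 8 and m <= lcd + n:
--             parts.append(str(m))
--             m += n
--         return ", ".join(parts)
--
--     return (f"Multiples of {a}: {row(a)}, ...\n"
--             f"Multiples of {b}: {row(b)}, ...\n"
--             f"Least Common Denominator (LCD) = {lcd}")
-- ===== Notes on version B (the rewrite author's own statement) =====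
-- stated objective: faster
-- what changed: B walks the multiples incrementally with a single bounded while loop (at most 8 iterations per row, stopping once past the LCD), instead of A's staged passes that materialise all lcd//n+2 multiples, filter them, and slice; Pre_ excludes a=0 or b=0, on which A raises ZeroDivisionError.
import Mathlib
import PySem

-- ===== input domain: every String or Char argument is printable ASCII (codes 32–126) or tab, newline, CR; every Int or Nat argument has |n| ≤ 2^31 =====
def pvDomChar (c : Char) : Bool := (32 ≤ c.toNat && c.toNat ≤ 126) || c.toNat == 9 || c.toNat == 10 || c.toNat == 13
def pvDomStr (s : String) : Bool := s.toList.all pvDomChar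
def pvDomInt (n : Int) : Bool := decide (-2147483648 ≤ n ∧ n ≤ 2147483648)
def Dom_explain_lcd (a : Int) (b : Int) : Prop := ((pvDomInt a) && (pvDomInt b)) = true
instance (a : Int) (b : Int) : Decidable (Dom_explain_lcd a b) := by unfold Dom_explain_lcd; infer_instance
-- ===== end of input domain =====

-- B walks the multiples with one bounded while loop (≤ 8 steps per row, stop past the LCD)
-- instead of A's materialise-all / filter / slice passes (objective: faster).

-- ===== PORT A =====
-- _multiples(n, count) = [n * i for i in range(1, count + 1)]
def pvMultiples (n : Int) (count : Int) : List Int :=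
  (PySem.List.pyRange 1 (count + 1) 1).map (fun i => n * i)

def explain_lcd (a : Int) (b : Int) : String :=
  let lcd : Int := (Int.lcm a b : Int)     -- math.lcm(a, b) (nonnegative)
  let count_a : Int := max 10 (PySem.Int.floordiv lcd a + 2)
  let count_b : Int := max 10 (PySem.Int.floordiv lcd b + 2)
  let mult_a := pvMultiples a count_a
  let mult_b := pvMultiples b count_b
  let show_a := PySem.List.slice (mult_a.filter (fun m => decide (m ≤ lcd + a))) none (some 8)
  let show_b := PySem.List.slice (mult_b.filter (fun m => decide (m ≤ lcd + b))) none (some 8)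
  let lines : List String := [
    "Multiples of " ++ PySem.Int.toStr a ++ ": " ++ PySem.Str.join ", " (show_a.map PySem.Int.toStr) ++ ", ...",
    "Multiples of " ++ PySem.Int.toStr b ++ ": " ++ PySem.Str.join ", " (show_b.map PySem.Int.toStr) ++ ", ...",
    "Least Common Denominator (LCD) = " ++ PySem.Int.toStr lcd]
  PySem.Str.join "\n" lines

-- ===== PORT B =====
-- while len(parts) < 8 and m <= lcd + n: parts.append(str(m)); m += n
def pvRowLoop (lcd n : Int) (parts : List String) (m : Int) : List String :=
  if _h : parts.length < 8 ∧ m ≤ lcd + n then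
    pvRowLoop lcd n (parts ++ [PySem.Int.toStr m]) (m + n)
  else parts
termination_by 8 - parts.length
decreasing_by simp; omega

def pvRow (lcd n : Int) : String :=
  PySem.Str.join ", " (pvRowLoop lcd n [] n)

def explain_lcd_alt (a : Int) (b : Int) : String :=
  let lcd : Int := (Int.lcm a b : Int)
  "Multiples of " ++ PySem.Int.toStr a ++ ": " ++ pvRow lcd a ++ ", ..." ++ "\n" ++
  "Multiples of " ++ PySem.Int.toStr b ++ ": " ++ pvRow lcd b ++ ", ..." ++ "\n" ++
  "Least Common Denominator (LCD) = " ++ PySem.Int.toStr lcd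

-- ===== PRECONDITION & SPEC =====
-- Pre_ excludes a = 0 or b = 0, on which A raises ZeroDivisionError (lcd // a).
def Pre_explain_lcd (a : Int) (b : Int) : Prop := a ≠ 0 ∧ b ≠ 0
instance (a : Int) (b : Int) : Decidable (Pre_explain_lcd a b) := by unfold Pre_explain_lcd; infer_instance
def pvWitness_explain_lcd : Int × Int := (4, 6)

def Spec_explain_lcd (a : Int) (b : Int) (out : String) : Prop := out = explain_lcd_alt a b
instance (a : Int) (b : Int) (out : String) : Decidable (Spec_explain_lcd a b out) := by unfold Spec_explain_lcd; infer_instance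

-- ===== CLAIM =====
def Claim_equal_explain_lcd : Prop := ∀ (a : Int) (b : Int), Dom_explain_lcd a b → Pre_explain_lcd a b → Spec_explain_lcd a b (explain_lcd a b)

-- ===== LEMMAS AND PROOFS =====

-- A's displayed list (filter then truncate at 8) in index form.
lemma show_eq (lcd n : Int) (hn : n ≠ 0) (hl : 0 ≤ lcd) :
    PySem.List.slice (((pvMultiples n (max 10 (PySem.Int.floordiv lcd n + 2)))).filter
        (fun m => decide (m ≤ lcd + n))) none (some 8)
      = (PySem.List.pyRange 1 ((if n < 0 then 8 else min 8 (PySem.Int.floordiv lcd n + 1)) + 1) 1).map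
          (fun i => n * i) := by
  unfold pvMultiples
  rw [PySem.List.slice_to _ (by norm_num)]
  rw [show ((8:Int)).toNat = 8 from rfl]
  by_cases hneg : n < 0
  · have h1 := PySem.Int.floordiv_mul_add_mod lcd n
    have h2 := PySem.Int.mod_neg_bounds lcd hneg
    have hfd : PySem.Int.floordiv lcd n ≤ 0 := by nlinarith [h2.1, h2.2]
    have hmax : max 10 (PySem.Int.floordiv lcd n + 2) = 10 := by omega
    rw [hmax, if_pos hneg]
    have hfil : (((PySem.List.pyRange 1 (10 + 1) 1).map (fun i => n * i)).filter
        (fun m => decide (m ≤ lcd + n))) = (PySem.List.pyRange 1 (10 + 1) 1).map (fun i => n * i) := by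
      apply List.filter_eq_self.2
      intro m hm
      simp only [List.mem_map, PySem.List.mem_pyRange_one] at hm
      obtain ⟨i, ⟨hi1, _⟩, rfl⟩ := hm
      simp only [decide_eq_true_eq]
      nlinarith
    rw [hfil]
    rw [PySem.List.pyRange_one 1 (10 + 1), PySem.List.pyRange_one 1 (8 + 1)]
    rw [List.map_map, List.map_map, ← List.map_take, List.take_range]
    congr 1
  · have hpos : 0 < n := lt_of_le_of_ne (not_lt.1 hneg) (Ne.symm hn)
    have hfd0 : 0 ≤ PySem.Int.floordiv lcd n :=
      (PySem.Int.le_floordiv_iff_mul_le hpos).2 (by simpa using hl)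
    have hmulle : PySem.Int.floordiv lcd n * n ≤ lcd :=
      (PySem.Int.le_floordiv_iff_mul_le hpos).1 le_rfl
    have hltmul : lcd < (PySem.Int.floordiv lcd n + 1) * n :=
      (PySem.Int.floordiv_lt_iff_lt_mul hpos).1 (by omega)
    rw [if_neg hneg]
    have hmaxge : PySem.Int.floordiv lcd n + 2 ≤ max 10 (PySem.Int.floordiv lcd n + 2) :=
      le_max_right _ _
    rw [PySem.List.pyRange_one_append 1 (PySem.Int.floordiv lcd n + 2)
        (max 10 (PySem.Int.floordiv lcd n + 2) + 1) (by omega) (by omega)]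
    rw [List.map_append, List.filter_append]
    have hfil1 : (((PySem.List.pyRange 1 (PySem.Int.floordiv lcd n + 2) 1).map (fun i => n * i)).filter
        (fun m => decide (m ≤ lcd + n)))
        = (PySem.List.pyRange 1 (PySem.Int.floordiv lcd n + 2) 1).map (fun i => n * i) := by
      apply List.filter_eq_self.2
      intro m hm
      simp only [List.mem_map, PySem.List.mem_pyRange_one] at hm
      obtain ⟨i, ⟨_, hi2⟩, rfl⟩ := hm
      simp only [decide_eq_true_eq]
      nlinarith
    have hfil2 : (((PySem.List.pyRange (PySem.Int.floordiv lcd n + 2)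
          (max 10 (PySem.Int.floordiv lcd n + 2) + 1) 1).map (fun i => n * i)).filter
        (fun m => decide (m ≤ lcd + n))) = [] := by
      apply List.filter_eq_nil_iff.2
      intro m hm
      simp only [List.mem_map, PySem.List.mem_pyRange_one] at hm
      obtain ⟨i, ⟨hi1, _⟩, rfl⟩ := hm
      simp only [decide_eq_true_eq]
      nlinarith
    rw [hfil1, hfil2, List.append_nil]
    rw [PySem.List.pyRange_one 1 (PySem.Int.floordiv lcd n + 2),
        PySem.List.pyRange_one 1 (min 8 (PySem.Int.floordiv lcd n + 1) + 1)]
    rw [List.map_map, List.map_map, ← List.map_take, List.take_range]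
    congr 1
    congr 1
    omega

-- B's loop for negative n runs its full budget of slots.
lemma loop_neg (lcd n : Int) (hneg : n < 0) (hl : 0 ≤ lcd) :
    ∀ (k : Nat) (acc : List String) (i : Int), 1 ≤ i → acc.length + k = 8 →
      pvRowLoop lcd n acc (n * i)
        = acc ++ (PySem.List.pyRange i (i + k) 1).map (fun j => PySem.Int.toStr (n * j)) := by
  intro k
  induction k with
  | zero =>
    intro acc i hi hlen
    rw [pvRowLoop, dif_neg (by omega), PySem.List.pyRange_one_eq_nil (by omega)]
    simp
  | succ k ih =>
    intro acc i hi hlen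
    have hcond : n * i ≤ lcd + n := by nlinarith
    rw [pvRowLoop, dif_pos ⟨by omega, hcond⟩]
    have hstep : n * i + n = n * (i + 1) := by ring
    rw [hstep, ih (acc ++ [PySem.Int.toStr (n * i)]) (i + 1) (by omega) (by simp; omega)]
    push_cast
    rw [show i + ((k : Int) + 1) = i + 1 + (k : Int) from by ring]
    rw [PySem.List.pyRange_one_cons (a := i) (b := i + 1 + (k : Int)) (by omega)]
    simp

-- B's loop for positive n stops at the first multiple past lcd + n.
lemma loop_pos (lcd n : Int) (hpos : 0 < n) :
    ∀ (k : Nat) (acc : List String) (i : Int), 1 ≤ i → acc.length + k = 8 →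
      pvRowLoop lcd n acc (n * i)
        = acc ++ (PySem.List.pyRange i (min (i + k) (PySem.Int.floordiv lcd n + 2)) 1).map
            (fun j => PySem.Int.toStr (n * j)) := by
  intro k
  induction k with
  | zero =>
    intro acc i hi hlen
    rw [pvRowLoop, dif_neg (by omega), PySem.List.pyRange_one_eq_nil (by omega)]
    simp
  | succ k ih =>
    intro acc i hi hlen
    have hiff : n * i ≤ lcd + n ↔ i ≤ PySem.Int.floordiv lcd n + 1 := by
      rw [show (i ≤ PySem.Int.floordiv lcd n + 1 ↔ i - 1 ≤ PySem.Int.floordiv lcd n) from by omega,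
        PySem.Int.le_floordiv_iff_mul_le hpos]
      constructor <;> intro h <;> nlinarith
    by_cases hc : i ≤ PySem.Int.floordiv lcd n + 1
    · rw [pvRowLoop, dif_pos ⟨by omega, hiff.2 hc⟩]
      have hstep : n * i + n = n * (i + 1) := by ring
      rw [hstep, ih (acc ++ [PySem.Int.toStr (n * i)]) (i + 1) (by omega) (by simp; omega)]
      push_cast
      rw [show min (i + ((k : Int) + 1)) (PySem.Int.floordiv lcd n + 2)
            = min (i + 1 + (k : Int)) (PySem.Int.floordiv lcd n + 2) from by omega]
      rw [PySem.List.pyRange_one_cons (a := i)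
            (b := min (i + 1 + (k : Int)) (PySem.Int.floordiv lcd n + 2)) (by omega)]
      simp
    · rw [pvRowLoop, dif_neg (by rw [hiff]; omega), PySem.List.pyRange_one_eq_nil (by omega)]
      simp

-- The strings A and B display for one row agree.
lemma rowstr_eq (lcd n : Int) (hn : n ≠ 0) (hl : 0 ≤ lcd) :
    PySem.Str.join ", "
        ((PySem.List.slice (((pvMultiples n (max 10 (PySem.Int.floordiv lcd n + 2)))).filter
            (fun m => decide (m ≤ lcd + n))) none (some 8)).map PySem.Int.toStr)
      = pvRow lcd n := by
  rw [show_eq lcd n hn hl]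
  unfold pvRow
  by_cases hneg : n < 0
  · have hloop := loop_neg lcd n hneg hl 8 [] 1 le_rfl rfl
    rw [mul_one] at hloop
    rw [hloop, if_pos hneg]
    norm_num
    simp [Function.comp_def]
  · have hpos : 0 < n := lt_of_le_of_ne (not_lt.1 hneg) (Ne.symm hn)
    have hloop := loop_pos lcd n hpos 8 [] 1 le_rfl rfl
    rw [mul_one] at hloop
    rw [hloop, if_neg hneg]
    rw [show min ((1:Int) + (8:Nat)) (PySem.Int.floordiv lcd n + 2)
          = min 8 (PySem.Int.floordiv lcd n + 1) + 1 from by push_cast; omega]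
    simp [List.map_map, Function.comp_def]

-- ===== VERDICT (by name: the statement is the Claim_ definition above) =====
theorem explain_lcd_spec : Claim_equal_explain_lcd := by
  intro a b _ hpre
  obtain ⟨ha, hb⟩ := hpre
  unfold Spec_explain_lcd
  show explain_lcd a b = explain_lcd_alt a b
  simp only [explain_lcd, explain_lcd_alt]
  have hl : (0:Int) ≤ (Int.lcm a b : Int) := Int.natCast_nonneg _
  rw [rowstr_eq _ a ha hl, rowstr_eq _ b hb hl]
  rw [← String.toList_inj]
  simp [PySem.Str.join, PySem.Chars.join, List.intercalate, List.intersperse]
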